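-- pv_equiv track=rewrite | github.com/KWSMooBang/AgentBeats-JarvisVLA | examples/rollout_mcu_benchmark.py | build_instruction_index
-- ===== SOURCE A (Python) =====
-- from typing import Any, Dict, List, Optional, Tuple
--
-- def build_instruction_index(prompt_library: dict) -> Dict[str, Dict[str, str]]:
--     """Build {prefix: {object_name: full_key}} from instructions.json."""
--     index: Dict[str, Dict[str, str]] = {}
--     prefixes = ('kill_entity', 'mine_block', 'craft_item', 'use_item', 'drop')
--     for key in prompt_library:
--         for p in prefixes:
--             tag = p + ':'
--             if key.startswith(tag):
--                 index.setdefault(p, {})[key[len(tag):]] = key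
--                 break
--     return index
-- ===== SOURCE B (Python) =====
-- def build_instruction_index(prompt_library: dict) -> dict:
--     """Build {prefix: {object_name: full_key}} from instructions.json."""
--     prefixes = frozenset(('kill_entity', 'mine_block', 'craft_item', 'use_item', 'drop'))
--     # stage 1: classify every key once into (prefix, object_name, full_key) triples
--     matched = []
--     for key in prompt_library:
--         prefix, sep, rest = key.partition(':')
--         if sep and prefix in prefixes:
--             matched.append((prefix, rest, key))
--     # stage 2: the prefixes in order of first occurrence
--     order = []
--     for prefix, _, _ in matched:
--         if prefix not in order:
--             order.append(prefix)
--     # stage 3: one inner dict per prefix, grouping the matched triples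
--     return {p: {rest: key for q, rest, key in matched if q == p} for p in order}
-- ===== Notes on version B (the rewrite author's own statement) =====
-- stated objective: alternative
-- what changed: Replaces A's single pass with an inner five-startswith probe loop and incremental setdefault nesting by three staged passes: classify each key once via partition(':') into (prefix, rest, key) triples, compute the first-occurrence prefix order, then build the nested dict by grouping (a filtered dict comprehension per prefix).
import Mathlib
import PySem

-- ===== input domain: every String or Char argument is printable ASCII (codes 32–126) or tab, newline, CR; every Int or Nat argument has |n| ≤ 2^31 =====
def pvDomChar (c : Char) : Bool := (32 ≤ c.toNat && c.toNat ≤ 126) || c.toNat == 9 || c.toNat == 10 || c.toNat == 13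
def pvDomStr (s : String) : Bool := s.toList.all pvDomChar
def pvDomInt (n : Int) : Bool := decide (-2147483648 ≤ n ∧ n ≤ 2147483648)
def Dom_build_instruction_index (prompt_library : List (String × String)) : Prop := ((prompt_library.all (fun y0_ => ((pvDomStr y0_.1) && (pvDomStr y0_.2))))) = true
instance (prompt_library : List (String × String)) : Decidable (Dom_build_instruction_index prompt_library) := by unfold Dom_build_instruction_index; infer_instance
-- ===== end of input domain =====

-- B replaces A's incremental setdefault nesting (with an inner five-startswith probe loop per key)
-- by three staged passes: classify each key once via partition(':'), compute the first-occurrence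
-- prefix order, then build the nested dict by grouping per prefix (objective: alternative).

-- ===== PORT A =====
-- inner 'for p in prefixes: … break' loop of A, as structural recursion over the prefix list
def pvTagsLoop (index : PySem.Dict String (PySem.Dict String String)) (key : String) :
    List String → PySem.Dict String (PySem.Dict String String)
  | [] => index
  | p :: ps =>
    let tag := p ++ ":"
    if PySem.Str.startswith key tag then
      -- index.setdefault(p, {})[key[len(tag):]] = key
      PySem.Dict.insert index p
        ((PySem.Dict.getD index p PySem.Dict.empty).insert
          (PySem.Str.slice key (some (PySem.Str.len tag)) none) key)
    else pvTagsLoop index key ps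

def build_instruction_index (prompt_library : List (String × String)) :
    List (String × List (String × String)) :=
  let prefixes : List String := ["kill_entity", "mine_block", "craft_item", "use_item", "drop"]
  let index : PySem.Dict String (PySem.Dict String String) :=
    prompt_library.foldl (fun idx kv => pvTagsLoop idx kv.1 prefixes) PySem.Dict.empty
  index.items.map (fun kv => (kv.1, kv.2.items))

-- ===== PORT B =====
-- key.partition(':'): ported by hand over the char list (no PySem primitive); exact: splits at the
-- FIRST ':' and reports via the Bool whether a ':' was present (Python's non-empty sep).
def pvPartitionColon (key : String) : String × Bool × String :=
  let cs := key.toList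
  let pre := cs.takeWhile (fun c => c != ':')
  match cs.dropWhile (fun c => c != ':') with
  | [] => (String.ofList pre, false, "")
  | _ :: rest => (String.ofList pre, true, String.ofList rest)

-- the frozenset of the five prefixes
def pvPrefixSet : PySem.Set String :=
  PySem.Set.ofList ["kill_entity", "mine_block", "craft_item", "use_item", "drop"]

def build_instruction_index_alt (prompt_library : List (String × String)) :
    List (String × List (String × String)) :=
  -- stage 1: classify every key once into (prefix, object_name, full_key) triples
  let matched : List (String × String × String) :=
    prompt_library.foldl (fun acc kv =>
      let pr := pvPartitionColon kv.1
      if pr.2.1 && PySem.Set.contains pvPrefixSet pr.1 then acc ++ [(pr.1, pr.2.2, kv.1)]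
      else acc) []
  -- stage 2: the prefixes in order of first occurrence ('if prefix not in order: order.append')
  let order : List String :=
    matched.foldl (fun acc t => if acc.contains t.1 then acc else acc ++ [t.1]) []
  -- stage 3: one inner dict per prefix, grouping the matched triples
  order.map (fun p =>
    (p, ((matched.filter (fun t => t.1 == p)).foldl
          (fun d t => d.insert t.2.1 t.2.2) PySem.Dict.empty).items))

-- ===== PRECONDITION & SPEC =====
def Spec_build_instruction_index (prompt_library : List (String × String)) (out : List (String × List (String × String))) : Prop := out = build_instruction_index_alt prompt_library
instance (prompt_library : List (String × String)) (out : List (String × List (String × String))) : Decidable (Spec_build_instruction_index prompt_library out) := by unfold Spec_build_instruction_index; infer_instance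

-- ===== CLAIM (what is proved, stated in full; the proofs are below) =====
def Claim_equal_build_instruction_index : Prop := ∀ (prompt_library : List (String × String)), Dom_build_instruction_index prompt_library → Spec_build_instruction_index prompt_library (build_instruction_index prompt_library)


-- ===== LEMMAS AND PROOFS =====

-- proof-side abbreviations: B's per-key classification test, the triple it records,
-- and A's nested-dict insertion step on a triple
def pvC (key : String) : Bool :=
  (pvPartitionColon key).2.1 && PySem.Set.contains pvPrefixSet (pvPartitionColon key).1
def pvH (key : String) : String × String × String :=
  ((pvPartitionColon key).1, (pvPartitionColon key).2.2, key)
def pvNest (d : PySem.Dict String (PySem.Dict String String)) (t : String × String × String) :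
    PySem.Dict String (PySem.Dict String String) :=
  d.insert t.1 ((d.getD t.1 PySem.Dict.empty).insert t.2.1 t.2.2)

theorem pv_head_false {cs : List Char} {P : Char → Bool} {c : Char} {t : List Char}
    (hd : List.dropWhile P cs = c :: t) : P c = false := by
  induction cs with
  | nil => simp at hd
  | cons a l ih =>
    rw [List.dropWhile_cons] at hd
    split at hd
    · exact ih hd
    · rename_i h; cases hd; simpa using h

theorem pv_take (p t : List Char) (hp : ':' ∉ p) :
    (p ++ ':' :: t).takeWhile (fun c => c != ':') = p := by
  have hall : p.takeWhile (fun c => c != ':') = p := by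
    rw [List.takeWhile_eq_self_iff]; intro x hx
    simp only [bne_iff_ne, ne_eq]; exact fun e => hp (e ▸ hx)
  rw [List.takeWhile_append]; simp [hall]

theorem pv_drop (p t : List Char) (hp : ':' ∉ p) :
    (p ++ ':' :: t).dropWhile (fun c => c != ':') = ':' :: t := by
  have hall : p.dropWhile (fun c => c != ':') = [] := by
    rw [List.dropWhile_eq_nil_iff]; intro x hx
    simp only [bne_iff_ne, ne_eq]; exact fun e => hp (e ▸ hx)
  rw [List.dropWhile_append]; simp [hall]

-- key.startswith(p + ':') ↔ the part before the first ':' is exactly p and a ':' exists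
theorem pv_sw (cs p : List Char) (hp : ':' ∉ p) :
    PySem.Chars.startswith cs (p ++ [':']) = true ↔
      cs.takeWhile (fun c => c != ':') = p ∧ cs.dropWhile (fun c => c != ':') ≠ [] := by
  rw [PySem.Chars.startswith_iff]
  constructor
  · rintro ⟨t, rfl⟩
    rw [List.append_assoc, List.singleton_append, pv_take _ _ hp, pv_drop _ _ hp]
    simp
  · rintro ⟨h1, h2⟩
    have hsplit := (List.takeWhile_append_dropWhile (p := fun c => c != ':') (l := cs)).symm
    rcases hd : cs.dropWhile (fun c => c != ':') with _ | ⟨c, t⟩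
    · exact absurd hd h2
    · have hcc : c = ':' := by simpa using pv_head_false hd
      exact ⟨t, by rw [hsplit, hd, h1, hcc]; simp⟩

theorem pv_sw_str (key : String) (p : String) (hp : ':' ∉ p.toList) :
    PySem.Str.startswith key (p ++ ":") = true ↔
      key.toList.takeWhile (fun c => c != ':') = p.toList ∧
      key.toList.dropWhile (fun c => c != ':') ≠ [] := by
  have : (p ++ ":").toList = p.toList ++ [':'] := by simp
  rw [show PySem.Str.startswith key (p ++ ":") =
        PySem.Chars.startswith key.toList (p ++ ":").toList by simp, this]
  exact pv_sw _ _ hp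

-- A's matched slice key[len(p + ':'):] is the remainder after the first ':'
theorem pv_slice (key : String) (p : String) (t : List Char)
    (h : key.toList = p.toList ++ ':' :: t) :
    PySem.Str.slice key (some (PySem.Str.len (p ++ ":"))) none = String.ofList t := by
  have hlen : PySem.Str.len (p ++ ":") = ((p.toList.length + 1 : Nat) : Int) := by
    simp [PySem.Str.len_eq]
  apply String.toList_injective
  rw [hlen]
  simp only [PySem.Str.toList_slice, PySem.Chars.slice_eq_listSlice,
    PySem.List.slice_from_natCast, h]
  rw [show p.toList ++ ':' :: t = (p.toList ++ [':']) ++ t by simp]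
  rw [List.drop_left' (by simp)]
  simp

-- one key: A's prefix-probe loop equals the classify-then-nest step on that key
theorem pv_step_eq (idx : PySem.Dict String (PySem.Dict String String)) (key : String) :
    pvTagsLoop idx key ["kill_entity", "mine_block", "craft_item", "use_item", "drop"] =
      (if pvC key then pvNest idx (pvH key) else idx) := by
  rcases hd : key.toList.dropWhile (fun c => c != ':') with _ | ⟨c, t⟩
  · -- no ':' in key: B skips, each startswith of A fails
    have hfail : ∀ p : String, ':' ∉ p.toList →
        PySem.Str.startswith key (p ++ ":") = false := by
      intro p hp
      rw [Bool.eq_false_iff]; intro h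
      exact ((pv_sw_str key p hp).mp h).2 hd
    simp only [pvTagsLoop, pvC, pvH, pvNest, pvPartitionColon, hd]
    rw [hfail "kill_entity" (by decide), hfail "mine_block" (by decide),
        hfail "craft_item" (by decide), hfail "use_item" (by decide),
        hfail "drop" (by decide)]
    simp
  · -- a ':' exists; compare the pre-colon part with each prefix
    have hcc : c = ':' := by simpa using pv_head_false hd
    subst hcc
    have hsplit : key.toList = key.toList.takeWhile (fun c => c != ':') ++ ':' :: t := by
      conv_lhs => rw [← List.takeWhile_append_dropWhile (p := fun c => c != ':') (l := key.toList)]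
      rw [hd]
    have hmatch : ∀ p : String, ':' ∉ p.toList →
        key.toList.takeWhile (fun c => c != ':') = p.toList →
        PySem.Str.startswith key (p ++ ":") = true := by
      intro p hp hpre
      exact (pv_sw_str key p hp).mpr ⟨hpre, by rw [hd]; simp⟩
    have hfail : ∀ p : String, ':' ∉ p.toList →
        key.toList.takeWhile (fun c => c != ':') ≠ p.toList →
        PySem.Str.startswith key (p ++ ":") = false := by
      intro p hp hpre
      rw [Bool.eq_false_iff]; intro h
      exact hpre ((pv_sw_str key p hp).mp h).1
    have hpos : ∀ p : String, ':' ∉ p.toList →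
        key.toList.takeWhile (fun c => c != ':') = p.toList →
        PySem.Dict.insert idx p
          ((PySem.Dict.getD idx p PySem.Dict.empty).insert
            (PySem.Str.slice key (some (PySem.Str.len (p ++ ":"))) none) key) =
        PySem.Dict.insert idx (String.ofList (key.toList.takeWhile (fun c => c != ':')))
          ((PySem.Dict.getD idx (String.ofList (key.toList.takeWhile (fun c => c != ':')))
            PySem.Dict.empty).insert (String.ofList t) key) := by
      intro p hp hpre
      rw [hpre, pv_slice key p t (by rw [← hpre]; exact hsplit)]
      simp
    by_cases h1 : key.toList.takeWhile (fun c => c != ':') = "kill_entity".toList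
    ·
      have fm := hmatch "kill_entity" (by decide) h1
      have hp := hpos "kill_entity" (by decide) h1
      simp only [pvTagsLoop, pvC, pvH, pvNest, pvPartitionColon, hd]
      rw [fm]
      simp only [if_true]
      rw [hp]
      simp [pvPrefixSet, PySem.Set.contains, PySem.Set.ofList, h1]
    ·
      by_cases h2 : key.toList.takeWhile (fun c => c != ':') = "mine_block".toList
      ·
        have fm := hmatch "mine_block" (by decide) h2
        have f1 := hfail "kill_entity" (by decide) h1
        have hp := hpos "mine_block" (by decide) h2
        simp only [pvTagsLoop, pvC, pvH, pvNest, pvPartitionColon, hd]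
        rw [f1, fm]
        simp only [if_true]
        rw [hp]
        simp [pvPrefixSet, PySem.Set.contains, PySem.Set.ofList, h2]
      ·
        by_cases h3 : key.toList.takeWhile (fun c => c != ':') = "craft_item".toList
        ·
          have fm := hmatch "craft_item" (by decide) h3
          have f1 := hfail "kill_entity" (by decide) h1
          have f2 := hfail "mine_block" (by decide) h2
          have hp := hpos "craft_item" (by decide) h3
          simp only [pvTagsLoop, pvC, pvH, pvNest, pvPartitionColon, hd]
          rw [f1, f2, fm]
          simp only [if_true]
          rw [hp]
          simp [pvPrefixSet, PySem.Set.contains, PySem.Set.ofList, h3]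
        ·
          by_cases h4 : key.toList.takeWhile (fun c => c != ':') = "use_item".toList
          ·
            have fm := hmatch "use_item" (by decide) h4
            have f1 := hfail "kill_entity" (by decide) h1
            have f2 := hfail "mine_block" (by decide) h2
            have f3 := hfail "craft_item" (by decide) h3
            have hp := hpos "use_item" (by decide) h4
            simp only [pvTagsLoop, pvC, pvH, pvNest, pvPartitionColon, hd]
            rw [f1, f2, f3, fm]
            simp only [if_true]
            rw [hp]
            simp [pvPrefixSet, PySem.Set.contains, PySem.Set.ofList, h4]
          ·
            by_cases h5 : key.toList.takeWhile (fun c => c != ':') = "drop".toList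
            ·
              have fm := hmatch "drop" (by decide) h5
              have f1 := hfail "kill_entity" (by decide) h1
              have f2 := hfail "mine_block" (by decide) h2
              have f3 := hfail "craft_item" (by decide) h3
              have f4 := hfail "use_item" (by decide) h4
              have hp := hpos "drop" (by decide) h5
              simp only [pvTagsLoop, pvC, pvH, pvNest, pvPartitionColon, hd]
              rw [f1, f2, f3, f4, fm]
              simp only [if_true]
              rw [hp]
              simp [pvPrefixSet, PySem.Set.contains, PySem.Set.ofList, h5]
            ·
              have toL : ∀ (l : List Char) (q : String), String.ofList l = q → l = q.toList := by
                intro l q e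
                have e2 := congrArg String.toList e
                rwa [String.toList_ofList] at e2
              have hset : pvPrefixSet =
                  ["kill_entity", "mine_block", "craft_item", "use_item", "drop"] := by decide
              have hnotin : PySem.Set.contains pvPrefixSet
                  (String.ofList (key.toList.takeWhile (fun c => c != ':'))) = false := by
                rw [hset]
                simp only [PySem.Set.contains, List.contains_eq_mem, decide_eq_false_iff_not]
                intro hmem
                rcases List.mem_cons.mp hmem with h | hmem
                · exact h1 (toL _ _ h)
                rcases List.mem_cons.mp hmem with h | hmem
                · exact h2 (toL _ _ h)
                rcases List.mem_cons.mp hmem with h | hmem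
                · exact h3 (toL _ _ h)
                rcases List.mem_cons.mp hmem with h | hmem
                · exact h4 (toL _ _ h)
                rcases List.mem_cons.mp hmem with h | hmem
                · exact h5 (toL _ _ h)
                · simp at hmem
              have f1 := hfail "kill_entity" (by decide) h1
              have f2 := hfail "mine_block" (by decide) h2
              have f3 := hfail "craft_item" (by decide) h3
              have f4 := hfail "use_item" (by decide) h4
              have f5 := hfail "drop" (by decide) h5
              simp only [pvTagsLoop, pvC, pvH, pvNest, pvPartitionColon, hd]
              rw [f1, f2, f3, f4, f5]
              simp only [hnotin, Bool.and_false, Bool.false_eq_true, if_false]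

-- a fold that skips non-matching elements is the fold over the classified triples
theorem pv_fold_filter (xs : List (String × String))
    (d : PySem.Dict String (PySem.Dict String String)) :
    xs.foldl (fun d kv => if pvC kv.1 then pvNest d (pvH kv.1) else d) d =
      ((xs.filter (fun kv => pvC kv.1)).map (fun kv => pvH kv.1)).foldl pvNest d := by
  induction xs generalizing d with
  | nil => rfl
  | cons kv xs ih =>
    by_cases h : pvC kv.1 = true
    · simp [h, ih]
    · simp only [Bool.not_eq_true] at h
      simp [h, ih]

-- lookup in the nested fold is the inner fold over the triples with that prefix
theorem pv_getD_nest (m : List (String × String × String))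
    (d : PySem.Dict String (PySem.Dict String String)) (p : String) :
    (m.foldl pvNest d).getD p PySem.Dict.empty =
      (m.filter (fun t => t.1 == p)).foldl (fun d' t => d'.insert t.2.1 t.2.2)
        (d.getD p PySem.Dict.empty) := by
  induction m generalizing d with
  | nil => rfl
  | cons t m ih =>
    rw [List.foldl_cons, ih, List.filter_cons]
    by_cases h : t.1 = p
    · simp [pvNest, h]
    · have hb : (t.1 == p) = false := by simpa using h
      have hg : (pvNest d t).getD p PySem.Dict.empty = d.getD p PySem.Dict.empty := by
        simp only [pvNest, PySem.Dict.getD_insert]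
        exact if_neg (fun e => h e.symm)
      rw [hb, hg]
      simp

-- ===== VERDICT (by name: the statement is the Claim_ definition above) =====
theorem build_instruction_index_spec : Claim_equal_build_instruction_index := by
  intro pl _
  unfold Spec_build_instruction_index build_instruction_index build_instruction_index_alt
  dsimp only
  have hstep : (fun (idx : PySem.Dict String (PySem.Dict String String)) (kv : String × String) =>
      pvTagsLoop idx kv.1 ["kill_entity", "mine_block", "craft_item", "use_item", "drop"]) =
      (fun idx kv => if pvC kv.1 then pvNest idx (pvH kv.1) else idx) :=
    funext fun idx => funext fun kv => pv_step_eq idx kv.1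
  -- the classified triples
  set M : List (String × String × String) :=
    (pl.filter (fun kv => pvC kv.1)).map (fun kv => pvH kv.1) with hM
  -- A's dict is the nested fold over M
  rw [hstep, pv_fold_filter, ← hM]
  -- B's matched list is M
  have hmatched : pl.foldl (fun acc kv =>
      let pr := pvPartitionColon kv.1
      if pr.2.1 && PySem.Set.contains pvPrefixSet pr.1 then acc ++ [(pr.1, pr.2.2, kv.1)]
      else acc) [] = M := by
    have : (fun (acc : List (String × String × String)) (kv : String × String) =>
        let pr := pvPartitionColon kv.1
        if pr.2.1 && PySem.Set.contains pvPrefixSet pr.1 then acc ++ [(pr.1, pr.2.2, kv.1)]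
        else acc) =
        (fun acc kv => if pvC kv.1 then acc ++ [pvH kv.1] else acc) := by
      funext acc kv; simp [pvC, pvH]
    rw [this, PySem.List.foldl_append_if, hM]; simp
  rw [hmatched]
  -- B's order list is the key list of A's dict
  have hk := PySem.Dict.keys_foldl_insert_key (ν := PySem.Dict String String) M
    (fun t : String × String × String => t.1)
    (fun d t => (d.getD t.1 PySem.Dict.empty).insert t.2.1 t.2.2) PySem.Dict.empty
  rw [PySem.Dict.keys_empty, PySem.Set.update_map_eq_foldl_add] at hk
  have horder : M.foldl (fun acc t => if acc.contains t.1 then acc else acc ++ [t.1]) [] =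
      (M.foldl pvNest PySem.Dict.empty).keys := by
    calc M.foldl (fun acc t => if acc.contains t.1 then acc else acc ++ [t.1]) []
        = M.foldl (fun s t => PySem.Set.add s t.1) [] := by
          have hfun : (fun (acc : List String) (t : String × String × String) =>
              if acc.contains t.1 then acc else acc ++ [t.1]) =
              (fun acc t => PySem.Set.add acc t.1) := by
            funext acc t
            by_cases hmem : t.1 ∈ acc
            · simp [hmem]
            · simp [hmem]
          rw [hfun]
      _ = (M.foldl pvNest PySem.Dict.empty).keys := by rw [← hk]; rfl
  rw [horder]
  -- the nested fold has unique keys, so its items enumerate its keys with their lookups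
  have hnd : (M.foldl pvNest PySem.Dict.empty).keys.Nodup :=
    PySem.Dict.nodup_keys_foldl_insert_key M (fun t => t.1)
      (fun d t => (d.getD t.1 PySem.Dict.empty).insert t.2.1 t.2.2) PySem.Dict.empty
      PySem.Dict.nodup_keys_empty
  rw [PySem.Dict.items_eq_map_keys (M.foldl pvNest PySem.Dict.empty) hnd PySem.Dict.empty,
      List.map_map]
  -- pointwise: A's lookup at each key is B's grouped inner dict
  refine List.map_congr_left (fun p _ => ?_)
  simp only [Function.comp]
  rw [pv_getD_nest, PySem.Dict.getD_empty]
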